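-- pv_equiv track=rewrite | github.com/nareshdevops9447/employee-appraisal-system | backend/app.py | determine_user_type
-- ===== SOURCE A (Python) =====
-- def determine_user_type(email):
--     email_lower = email.lower()
--     office_domains = ['outlook.com', 'hotmail.com', 'live.com', 'microsoft.com']
--
--     for domain in office_domains:
--         if email_lower.endswith('@' + domain):
--             return 'office'
--
--     field_domains = ['gmail.com', 'yahoo.com', 'aol.com', 'icloud.com', 'protonmail.com']
--     for domain in field_domains:
--         if email_lower.endswith('@' + domain):
--             return 'field'
--
--     return 'office'
-- ===== SOURCE B (Python) =====
-- FIELD_DOMAINS = {'gmail.com', 'yahoo.com', 'aol.com', 'icloud.com', 'protonmail.com'}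
--
--
-- def determine_user_type(email):
--     _before, sep, domain = email.lower().rpartition('@')
--     if sep and domain in FIELD_DOMAINS:
--         return 'field'
--     return 'office'
-- ===== Notes on version B (the rewrite author's own statement) =====
-- stated objective: idiomatic
-- what changed: B parses the address once with rpartition('@') and does a single set-membership test on the domain (only the field set matters, since every non-field address yields 'office'), replacing A's nine suffix scans over two hard-coded lists.
import Mathlib
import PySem

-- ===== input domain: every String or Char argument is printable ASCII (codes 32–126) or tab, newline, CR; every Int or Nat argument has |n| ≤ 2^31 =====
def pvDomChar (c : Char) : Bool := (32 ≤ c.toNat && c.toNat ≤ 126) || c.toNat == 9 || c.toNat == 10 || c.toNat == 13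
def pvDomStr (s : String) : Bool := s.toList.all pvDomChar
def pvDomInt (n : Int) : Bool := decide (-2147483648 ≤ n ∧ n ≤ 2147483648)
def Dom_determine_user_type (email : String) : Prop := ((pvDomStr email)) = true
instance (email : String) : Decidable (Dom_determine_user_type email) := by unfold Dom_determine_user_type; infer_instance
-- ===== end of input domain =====

-- B parses the address once with rpartition('@') and tests the domain against one set, replacing A's nine endswith scans (idiomatic; return value proved equal).

-- ===== PORT A =====
def determine_user_type (email : String) : String :=
  let email_lower := PySem.Str.lower email
  let office_domains : List String := ["outlook.com", "hotmail.com", "live.com", "microsoft.com"]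
  if office_domains.any (fun d => PySem.Str.endswith email_lower ("@" ++ d)) then "office"
  else
    let field_domains : List String := ["gmail.com", "yahoo.com", "aol.com", "icloud.com", "protonmail.com"]
    if field_domains.any (fun d => PySem.Str.endswith email_lower ("@" ++ d)) then "field"
    else "office"

-- ===== PORT B =====
-- hand port of str.rpartition('@') (PySem has no rpartition): split at the LAST '@';
-- exact: returns (part before last '@', true, part after) or ([], false, whole string) when no '@'.
def pvRPartitionAt (cs : List Char) : List Char × Bool × List Char :=
  let r := cs.reverse
  let domR := r.takeWhile (· ≠ '@')
  if '@' ∈ cs then ((r.drop (domR.length + 1)).reverse, true, domR.reverse)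
  else ([], false, cs)

def pvFieldDomains : List (List Char) :=
  ["gmail.com".toList, "yahoo.com".toList, "aol.com".toList, "icloud.com".toList, "protonmail.com".toList]

def determine_user_type_alt (email : String) : String :=
  let p := pvRPartitionAt (PySem.Str.lower email).toList
  if p.2.1 && pvFieldDomains.contains p.2.2 then "field" else "office"

-- ===== PRECONDITION & SPEC =====
def Spec_determine_user_type (email : String) (out : String) : Prop := out = determine_user_type_alt email
instance (email : String) (out : String) : Decidable (Spec_determine_user_type email out) := by unfold Spec_determine_user_type; infer_instance

-- ===== CLAIM (what is proved, stated in full; the proofs are below) =====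
def Claim_equal_determine_user_type : Prop := ∀ (email : String), Dom_determine_user_type email → Spec_determine_user_type email (determine_user_type email)

-- ===== LEMMAS AND PROOFS =====

-- a prefix "e ++ ['@']" (e free of '@') is exactly: r contains '@' and its '@'-free head is e
lemma prefix_append_at_iff (e r : List Char) (he : '@' ∉ e) :
    ((e ++ ['@']) <+: r) ↔ ('@' ∈ r ∧ r.takeWhile (· ≠ '@') = e) := by
  induction e generalizing r with
  | nil =>
    cases r with
    | nil => simp
    | cons c t =>
      by_cases hc : c = '@'
      · subst hc; simp [List.cons_prefix_cons]
      · simp [hc, List.cons_prefix_cons, Ne.symm hc]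
  | cons a e ih =>
    have ha : a ≠ '@' := fun h => he (by simp [h])
    have he' : '@' ∉ e := fun h => he (List.mem_cons_of_mem _ h)
    cases r with
    | nil => simp
    | cons c t =>
      rw [List.cons_append, List.cons_prefix_cons, List.takeWhile_cons, ih t he']
      by_cases hc : c = a
      · subst hc
        rw [if_pos (by simpa using ha)]
        constructor
        · rintro ⟨-, h1, h2⟩; exact ⟨List.mem_cons_of_mem _ h1, by rw [h2]⟩
        · rintro ⟨h1, h2⟩
          simp only [List.cons.injEq, true_and] at h2
          refine ⟨rfl, ?_, h2⟩
          rcases List.mem_cons.mp h1 with h | h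
          · exact absurd h.symm ha
          · exact h
      · constructor
        · rintro ⟨h, -⟩; exact absurd h (fun hh => hc hh.symm)
        · rintro ⟨-, h2⟩
          by_cases hat : c = '@'
          · rw [if_neg (by simp [hat])] at h2
            exact ((List.cons_ne_nil a e) h2.symm).elim
          · rw [if_pos (by simp [hat])] at h2
            injection h2 with h h'
            exact (hc h).elim

-- A's endswith test characterised by B's quantities (membership of '@' and the last-'@' domain)
lemma endswith_at_iff (cs d : List Char) (hd : '@' ∉ d) :
    (('@' :: d) <:+ cs) ↔ ('@' ∈ cs ∧ (cs.reverse.takeWhile (· ≠ '@')).reverse = d) := by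
  rw [← List.reverse_prefix]
  have h : ('@' :: d).reverse = d.reverse ++ ['@'] := by simp
  rw [h, prefix_append_at_iff _ _ (by simpa using hd), List.mem_reverse]
  constructor
  · rintro ⟨h1, h2⟩; exact ⟨h1, by rw [h2]; simp⟩
  · rintro ⟨h1, h2⟩; exact ⟨h1, by rw [← h2]; simp⟩

lemma endswith_eq_test (el : List Char) (d : String) (hd : '@' ∉ d.toList) :
    PySem.Chars.endswith el ("@" ++ d).toList
      = (decide ('@' ∈ el) && ((el.reverse.takeWhile (· ≠ '@')).reverse == d.toList)) := by
  have h1 : ("@" ++ d).toList = '@' :: d.toList := by simp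
  rw [h1]
  by_cases h : ('@' :: d.toList) <:+ el
  · rw [(PySem.Chars.endswith_iff ..).mpr h]
    rcases (endswith_at_iff el d.toList hd).mp h with ⟨ha, hb⟩
    rw [decide_eq_true ha, (beq_iff_eq ..).mpr hb]
    rfl
  · have hf : PySem.Chars.endswith el ('@' :: d.toList) = false := by
      rcases hh : PySem.Chars.endswith el ('@' :: d.toList) with _ | _
      · rfl
      · exact absurd ((PySem.Chars.endswith_iff ..).mp hh) h
    rw [hf]
    rw [endswith_at_iff el d.toList hd] at h
    rcases Decidable.not_and_iff_or_not.mp h with h' | h'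
    · simp [h']
    · rw [(beq_eq_false_iff_ne ..).mpr h']
      simp

-- ===== VERDICT (by name: the statement is the Claim_ definition above) =====
theorem determine_user_type_spec : Claim_equal_determine_user_type := by
  intro email _
  unfold Spec_determine_user_type
  simp only [determine_user_type, determine_user_type_alt, pvRPartitionAt, pvFieldDomains,
    List.any_cons, List.any_nil, PySem.Str.endswith_eq, PySem.Str.toList_lower]
  set el := PySem.Chars.lower email.toList with hel
  rw [endswith_eq_test el "outlook.com" (by decide), endswith_eq_test el "hotmail.com" (by decide),
      endswith_eq_test el "live.com" (by decide), endswith_eq_test el "microsoft.com" (by decide),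
      endswith_eq_test el "gmail.com" (by decide), endswith_eq_test el "yahoo.com" (by decide),
      endswith_eq_test el "aol.com" (by decide), endswith_eq_test el "icloud.com" (by decide),
      endswith_eq_test el "protonmail.com" (by decide)]
  by_cases hat : '@' ∈ el
  · rw [if_pos hat, decide_eq_true hat]
    simp only [Bool.true_and]
    generalize (List.takeWhile (fun x => decide (x ≠ '@')) el.reverse).reverse = g
    by_cases h1 : g = "outlook.com".toList
    · subst h1; decide
    by_cases h2 : g = "hotmail.com".toList
    · subst h2; decide
    by_cases h3 : g = "live.com".toList
    · subst h3; decide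
    by_cases h4 : g = "microsoft.com".toList
    · subst h4; decide
    by_cases h5 : g = "gmail.com".toList
    · subst h5; decide
    by_cases h6 : g = "yahoo.com".toList
    · subst h6; decide
    by_cases h7 : g = "aol.com".toList
    · subst h7; decide
    by_cases h8 : g = "icloud.com".toList
    · subst h8; decide
    by_cases h9 : g = "protonmail.com".toList
    · subst h9; decide
    simp [List.contains_eq_mem]
    exact fun _ => ⟨by simpa using h5, by simpa using h6, by simpa using h7,
      by simpa using h8, by simpa using h9⟩
  · rw [if_neg hat, decide_eq_false hat]
    simp
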